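-- pv_equiv track=rewrite | github.com/agrin10/tagtrack | src/production/routes.py | _compute_factory_permissions
-- ===== SOURCE A (Python) =====
-- def _compute_factory_permissions(role_name: str) -> dict:
--     """Return field-level factory permissions based on role name."""
--     role = (role_name or '').strip()
--     # Default: read-only everywhere
--     perms = {
--         "can_edit_job_metrics": False,
--         "can_edit_machine_data": False,
--         "can_edit_production_steps": False,
--         "can_edit_invoice": False,
--         "can_edit_status": False,
--     }
--
--     if role.lower() == 'admin':
--         for k in list(perms.keys()):
--             perms[k] = True
--     elif role.lower() == 'ordermanager':
--         perms["can_edit_status"] = True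
--     elif role.lower() == 'factorysupervisor':
--         perms.update({
--             "can_edit_job_metrics": True,
--             "can_edit_machine_data": True,
--             "can_edit_production_steps": True,
--             "can_edit_status": True,
--             # cannot edit invoice
--         })
--     elif role.lower() == 'designer':
--         # read-only
--         pass
--     elif role.lower() == 'invoiceclerk':
--         perms["can_edit_invoice"] = True
--
--     return perms
-- ===== SOURCE B (Python) =====
-- _PERM_KEYS = [
--     "can_edit_job_metrics",
--     "can_edit_machine_data",
--     "can_edit_production_steps",
--     "can_edit_invoice",
--     "can_edit_status",
-- ]
--
-- _ROLE_GRANTS = {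
--     "admin": _PERM_KEYS,
--     "ordermanager": ["can_edit_status"],
--     "factorysupervisor": ["can_edit_job_metrics", "can_edit_machine_data",
--                           "can_edit_production_steps", "can_edit_status"],
--     "designer": [],
--     "invoiceclerk": ["can_edit_invoice"],
-- }
--
--
-- def _compute_factory_permissions(role_name: str) -> dict:
--     granted = _ROLE_GRANTS.get((role_name or '').strip().lower(), [])
--     return {k: k in granted for k in _PERM_KEYS}
-- ===== Notes on version B (the rewrite author's own statement) =====
-- stated objective: idiomatic
-- what changed: Replaced the five-way if/elif chain that mutates a default dict with a declarative role->granted-keys table plus a single dict comprehension over the key list.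
import Mathlib
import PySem

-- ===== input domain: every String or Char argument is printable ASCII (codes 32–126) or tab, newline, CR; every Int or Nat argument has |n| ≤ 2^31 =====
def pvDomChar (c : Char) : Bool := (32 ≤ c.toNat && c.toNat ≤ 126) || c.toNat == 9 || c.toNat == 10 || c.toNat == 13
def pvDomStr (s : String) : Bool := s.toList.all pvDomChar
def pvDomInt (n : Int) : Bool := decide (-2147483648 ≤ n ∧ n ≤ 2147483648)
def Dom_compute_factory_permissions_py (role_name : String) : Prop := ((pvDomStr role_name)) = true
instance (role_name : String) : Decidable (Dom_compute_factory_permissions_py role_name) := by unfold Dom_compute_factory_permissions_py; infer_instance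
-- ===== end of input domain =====

-- B replaces A's if/elif chain mutating a default dict by a role→granted-keys table
-- and one comprehension over the key list (objective: idiomatic).

-- ===== PORT A =====
def compute_factory_permissions_py (role_name : String) : List (String × Bool) :=
  -- role = (role_name or '').strip()  ('or' is the identity on str inputs)
  let role := PySem.Str.strip role_name
  let perms : PySem.Dict String Bool := PySem.Dict.ofList
    [("can_edit_job_metrics", false), ("can_edit_machine_data", false),
     ("can_edit_production_steps", false), ("can_edit_invoice", false),
     ("can_edit_status", false)]
  let perms :=
    if PySem.Str.lower role = "admin" then
      (PySem.Dict.keys perms).foldl (fun d k => d.insert k true) perms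
    else if PySem.Str.lower role = "ordermanager" then
      perms.insert "can_edit_status" true
    else if PySem.Str.lower role = "factorysupervisor" then
      perms.update [("can_edit_job_metrics", true), ("can_edit_machine_data", true),
                    ("can_edit_production_steps", true), ("can_edit_status", true)]
    else if PySem.Str.lower role = "designer" then
      perms
    else if PySem.Str.lower role = "invoiceclerk" then
      perms.insert "can_edit_invoice" true
    else perms
  perms.items

-- ===== PORT B =====
def cfpPermKeys : List String :=
  ["can_edit_job_metrics", "can_edit_machine_data", "can_edit_production_steps",
   "can_edit_invoice", "can_edit_status"]

def cfpRoleGrants : PySem.Dict String (List String) := PySem.Dict.ofList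
  [("admin", cfpPermKeys),
   ("ordermanager", ["can_edit_status"]),
   ("factorysupervisor", ["can_edit_job_metrics", "can_edit_machine_data",
                          "can_edit_production_steps", "can_edit_status"]),
   ("designer", []),
   ("invoiceclerk", ["can_edit_invoice"])]

def compute_factory_permissions_py_alt (role_name : String) : List (String × Bool) :=
  let granted := cfpRoleGrants.getD (PySem.Str.lower (PySem.Str.strip role_name)) []
  cfpPermKeys.map (fun k => (k, granted.contains k))

-- ===== PRECONDITION & SPEC =====
def Spec_compute_factory_permissions_py (role_name : String) (out : List (String × Bool)) : Prop := out = compute_factory_permissions_py_alt role_name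
instance (role_name : String) (out : List (String × Bool)) : Decidable (Spec_compute_factory_permissions_py role_name out) := by unfold Spec_compute_factory_permissions_py; infer_instance

-- ===== CLAIM (what is proved, stated in full; the proofs are below) =====
def Claim_equal_compute_factory_permissions_py : Prop := ∀ (role_name : String), Dom_compute_factory_permissions_py role_name → Spec_compute_factory_permissions_py role_name (compute_factory_permissions_py role_name)

-- ===== LEMMAS AND PROOFS =====

-- Both programs depend on role_name only through the normalised key; case split on it.
theorem cfp_key_cases (s : String) :
    (let perms : PySem.Dict String Bool := PySem.Dict.ofList
        [("can_edit_job_metrics", false), ("can_edit_machine_data", false),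
         ("can_edit_production_steps", false), ("can_edit_invoice", false),
         ("can_edit_status", false)]
      let perms :=
        if s = "admin" then
          (PySem.Dict.keys perms).foldl (fun d k => d.insert k true) perms
        else if s = "ordermanager" then
          perms.insert "can_edit_status" true
        else if s = "factorysupervisor" then
          perms.update [("can_edit_job_metrics", true), ("can_edit_machine_data", true),
                        ("can_edit_production_steps", true), ("can_edit_status", true)]
        else if s = "designer" then
          perms
        else if s = "invoiceclerk" then
          perms.insert "can_edit_invoice" true
        else perms
      perms.items) =
    cfpPermKeys.map (fun k => (k, (cfpRoleGrants.getD s []).contains k)) := by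
  by_cases h1 : s = "admin"
  · subst h1; decide
  · by_cases h2 : s = "ordermanager"
    · subst h2; decide
    · by_cases h3 : s = "factorysupervisor"
      · subst h3; decide
      · by_cases h4 : s = "designer"
        · subst h4; decide
        · by_cases h5 : s = "invoiceclerk"
          · subst h5; decide
          · simp only [h1, h2, h3, h4, h5, if_false]
            rw [PySem.Dict.getD_of_not_contains]
            · decide
            · simp [cfpRoleGrants, PySem.Dict.ofList, PySem.Dict.update,
                    PySem.Dict.contains_insert, PySem.Dict.contains_empty, h1, h2, h3, h4, h5]

-- ===== VERDICT (by name: the statement is the Claim_ definition above) =====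
theorem compute_factory_permissions_py_spec : Claim_equal_compute_factory_permissions_py := by
  intro role_name _
  unfold Spec_compute_factory_permissions_py compute_factory_permissions_py compute_factory_permissions_py_alt
  exact cfp_key_cases (PySem.Str.lower (PySem.Str.strip role_name))
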